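-- pv_equiv track=rewrite | github.com/BrooklynD23/IA-West-SmartMatch | Category 3 - IA West Smart Match CRM/src/api/routers/portals.py | _infer_role_from_email
-- ===== SOURCE A (Python) =====
-- def _infer_role_from_email(email: str) -> str:
--     """Infer default portal role from email (used when UI does not send an explicit role)."""
--     if email.endswith("@iawest.org"):
--         return "ia_admin"
--     if any(
--         email.endswith(domain)
--         for domain in ("@cpp.edu", "@uci.edu", "@csuf.edu", "@ucsd.edu", "@usc.edu")
--     ):
--         return "event_coordinator"
--     return "student"
-- ===== SOURCE B (Python) =====
-- _ROLE_BY_DOMAIN = {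
--     "iawest.org": "ia_admin",
--     "cpp.edu": "event_coordinator",
--     "uci.edu": "event_coordinator",
--     "csuf.edu": "event_coordinator",
--     "ucsd.edu": "event_coordinator",
--     "usc.edu": "event_coordinator",
-- }
--
--
-- def _infer_role_from_email(email: str) -> str:
--     """Infer default portal role from email (used when UI does not send an explicit role)."""
--     _, sep, domain = email.rpartition("@")
--     if not sep:
--         return "student"
--     return _ROLE_BY_DOMAIN.get(domain, "student")
-- ===== Notes on version B (the rewrite author's own statement) =====
-- stated objective: idiomatic
-- what changed: B replaces A's six endswith suffix scans and the any(...) generator by one rpartition of the email at its last at-sign followed by a single dict lookup of the bare domain.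
import Mathlib
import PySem

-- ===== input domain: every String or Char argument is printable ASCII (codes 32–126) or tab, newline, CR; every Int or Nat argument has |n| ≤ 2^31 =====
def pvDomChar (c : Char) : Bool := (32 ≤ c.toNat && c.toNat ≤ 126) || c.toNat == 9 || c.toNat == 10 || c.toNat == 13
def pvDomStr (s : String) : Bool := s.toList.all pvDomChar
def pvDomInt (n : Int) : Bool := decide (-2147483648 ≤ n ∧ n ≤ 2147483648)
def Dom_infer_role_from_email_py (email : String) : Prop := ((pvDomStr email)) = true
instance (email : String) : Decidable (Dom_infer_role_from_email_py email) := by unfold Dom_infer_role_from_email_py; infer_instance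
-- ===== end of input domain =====

-- B replaces A's repeated endswith suffix scans by one rpartition of the email at its
-- last '@' followed by a single dict lookup of the bare domain (objective: idiomatic).

-- ===== PORT A =====
def infer_role_from_email_py (email : String) : String :=
  if PySem.Str.endswith email "@iawest.org" then "ia_admin"
  else if ["@cpp.edu", "@uci.edu", "@csuf.edu", "@ucsd.edu", "@usc.edu"].any
      (fun domain => PySem.Str.endswith email domain) then "event_coordinator"
  else "student"

-- ===== PORT B =====
-- `email.rpartition("@")` has no PySem primitive; it is ported by hand, exactly:
-- split at the LAST '@' (found by scanning the reversal), sep empty iff no '@' occurs,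
-- and the third component is everything after that last '@'.
def pvRpartitionAt (s : List Char) : List Char × List Char × List Char :=
  let r := s.reverse
  let tail := r.takeWhile (· ≠ '@')
  if r.dropWhile (· ≠ '@') = [] then ([], [], s)
  else ((r.dropWhile (· ≠ '@')).reverse.dropLast, ['@'], tail.reverse)

-- the module-level dict _ROLE_BY_DOMAIN (keys bridged to List Char)
def pvRoleByDomain : List (List Char × String) :=
  [(['i', 'a', 'w', 'e', 's', 't', '.', 'o', 'r', 'g'], "ia_admin"),
   (['c', 'p', 'p', '.', 'e', 'd', 'u'], "event_coordinator"),
   (['u', 'c', 'i', '.', 'e', 'd', 'u'], "event_coordinator"),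
   (['c', 's', 'u', 'f', '.', 'e', 'd', 'u'], "event_coordinator"),
   (['u', 'c', 's', 'd', '.', 'e', 'd', 'u'], "event_coordinator"),
   (['u', 's', 'c', '.', 'e', 'd', 'u'], "event_coordinator")]

def infer_role_from_email_py_alt (email : String) : String :=
  let p := pvRpartitionAt email.toList
  if p.2.1 = [] then "student"
  else (pvRoleByDomain.lookup p.2.2).getD "student"

-- ===== PRECONDITION & SPEC =====
def Spec_infer_role_from_email_py (email : String) (out : String) : Prop := out = infer_role_from_email_py_alt email
instance (email : String) (out : String) : Decidable (Spec_infer_role_from_email_py email out) := by unfold Spec_infer_role_from_email_py; infer_instance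

-- ===== CLAIM (what is proved, stated in full; the proofs are below) =====
def Claim_equal_infer_role_from_email_py : Prop := ∀ (email : String), Dom_infer_role_from_email_py email → Spec_infer_role_from_email_py email (infer_role_from_email_py email)

-- ===== LEMMAS AND PROOFS =====

-- a list ends with '@'::d  ↔  its reversal starts with d.reverse followed by '@'
lemma pv_key (r e : List Char) (he : '@' ∉ e) :
    e ++ ['@'] <+: r ↔ (r.dropWhile (· ≠ '@') ≠ [] ∧ r.takeWhile (· ≠ '@') = e) := by
  induction e generalizing r with
  | nil =>
    cases r with
    | nil => simp
    | cons c rs =>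
      by_cases hc : c = '@'
      · simp [hc, List.cons_prefix_cons]
      · simp only [List.nil_append, List.cons_prefix_cons, List.takeWhile_cons,
          List.dropWhile_cons]
        simp [hc, Ne.symm hc]
  | cons a e' ih =>
    have ha : a ≠ '@' := fun h => he (h ▸ List.mem_cons_self ..)
    have ha' : ¬ ('@' ∈ e') := fun h => he (List.mem_cons_of_mem _ h)
    cases r with
    | nil => simp
    | cons c rs =>
      simp only [List.cons_append, List.cons_prefix_cons, List.takeWhile_cons,
        List.dropWhile_cons]
      by_cases hc : c = a
      · subst hc
        simp [ha, ih rs ha']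
      · by_cases hc2 : c = '@' <;> simp [hc, hc2, Ne.symm hc, ha]

lemma pv_endswith_iff (s d : List Char) (hd : '@' ∉ d) :
    PySem.Chars.endswith s ('@' :: d) = true ↔
      (s.reverse.dropWhile (· ≠ '@') ≠ [] ∧ s.reverse.takeWhile (· ≠ '@') = d.reverse) := by
  rw [PySem.Chars.endswith_iff, ← List.reverse_prefix]
  have : ('@' :: d).reverse = d.reverse ++ ['@'] := by simp
  rw [this, pv_key _ _ (by simpa using hd)]

-- ===== VERDICT (by name: the statement is the Claim_ definition above) =====
theorem infer_role_from_email_py_spec : Claim_equal_infer_role_from_email_py := by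
  intro email _
  unfold Spec_infer_role_from_email_py infer_role_from_email_py infer_role_from_email_py_alt
    pvRpartitionAt pvRoleByDomain
  have h1 := pv_endswith_iff email.toList (['i', 'a', 'w', 'e', 's', 't', '.', 'o', 'r', 'g'] : List Char) (by decide)
  have h2 := pv_endswith_iff email.toList (['c', 'p', 'p', '.', 'e', 'd', 'u'] : List Char) (by decide)
  have h3 := pv_endswith_iff email.toList (['u', 'c', 'i', '.', 'e', 'd', 'u'] : List Char) (by decide)
  have h4 := pv_endswith_iff email.toList (['c', 's', 'u', 'f', '.', 'e', 'd', 'u'] : List Char) (by decide)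
  have h5 := pv_endswith_iff email.toList (['u', 'c', 's', 'd', '.', 'e', 'd', 'u'] : List Char) (by decide)
  have h6 := pv_endswith_iff email.toList (['u', 's', 'c', '.', 'e', 'd', 'u'] : List Char) (by decide)
  simp only [PySem.Str.endswith_eq]
  set t := email.toList.reverse.takeWhile (· ≠ '@') with ht
  by_cases hdw : email.toList.reverse.dropWhile (· ≠ '@') = []
  · have e1 : PySem.Chars.endswith email.toList (['@', 'i', 'a', 'w', 'e', 's', 't', '.', 'o', 'r', 'g'] : List Char) = false := by
      rw [Bool.eq_false_iff]; exact fun h => (h1.mp h).1 hdw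
    have e2 : PySem.Chars.endswith email.toList (['@', 'c', 'p', 'p', '.', 'e', 'd', 'u'] : List Char) = false := by
      rw [Bool.eq_false_iff]; exact fun h => (h2.mp h).1 hdw
    have e3 : PySem.Chars.endswith email.toList (['@', 'u', 'c', 'i', '.', 'e', 'd', 'u'] : List Char) = false := by
      rw [Bool.eq_false_iff]; exact fun h => (h3.mp h).1 hdw
    have e4 : PySem.Chars.endswith email.toList (['@', 'c', 's', 'u', 'f', '.', 'e', 'd', 'u'] : List Char) = false := by
      rw [Bool.eq_false_iff]; exact fun h => (h4.mp h).1 hdw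
    have e5 : PySem.Chars.endswith email.toList (['@', 'u', 'c', 's', 'd', '.', 'e', 'd', 'u'] : List Char) = false := by
      rw [Bool.eq_false_iff]; exact fun h => (h5.mp h).1 hdw
    have e6 : PySem.Chars.endswith email.toList (['@', 'u', 's', 'c', '.', 'e', 'd', 'u'] : List Char) = false := by
      rw [Bool.eq_false_iff]; exact fun h => (h6.mp h).1 hdw
    rw [if_pos hdw]
    simp [e1, e2, e3, e4, e5, e6]
  · have hrev : ∀ d : List Char, t = d.reverse → t.reverse = d := by
      intro d h; rw [h, List.reverse_reverse]
    have hrev' : ∀ d : List Char, t ≠ d.reverse → (t.reverse == d) = false := by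
      intro d h
      rw [beq_eq_false_iff_ne]
      exact fun hc => h (by rw [← hc, List.reverse_reverse])
    simp only [eq_false hdw, if_false]
    by_cases q1 : t = (['i', 'a', 'w', 'e', 's', 't', '.', 'o', 'r', 'g'] : List Char).reverse
    · have e1 := h1.mpr ⟨hdw, q1⟩
      simp [e1, hrev _ q1, List.lookup]
    · have e1 : PySem.Chars.endswith email.toList (['@', 'i', 'a', 'w', 'e', 's', 't', '.', 'o', 'r', 'g'] : List Char) = false := by
        rw [Bool.eq_false_iff]; exact fun h => q1 (h1.mp h).2
      have k1 := hrev' _ q1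
      by_cases q2 : t = (['c', 'p', 'p', '.', 'e', 'd', 'u'] : List Char).reverse
      · have e2 := h2.mpr ⟨hdw, q2⟩
        simp [e1, e2, hrev _ q2, List.lookup]
      · have e2 : PySem.Chars.endswith email.toList (['@', 'c', 'p', 'p', '.', 'e', 'd', 'u'] : List Char) = false := by
          rw [Bool.eq_false_iff]; exact fun h => q2 (h2.mp h).2
        have k2 := hrev' _ q2
        by_cases q3 : t = (['u', 'c', 'i', '.', 'e', 'd', 'u'] : List Char).reverse
        · have e3 := h3.mpr ⟨hdw, q3⟩
          simp [e1, e2, e3, hrev _ q3, List.lookup]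
        · have e3 : PySem.Chars.endswith email.toList (['@', 'u', 'c', 'i', '.', 'e', 'd', 'u'] : List Char) = false := by
            rw [Bool.eq_false_iff]; exact fun h => q3 (h3.mp h).2
          have k3 := hrev' _ q3
          by_cases q4 : t = (['c', 's', 'u', 'f', '.', 'e', 'd', 'u'] : List Char).reverse
          · have e4 := h4.mpr ⟨hdw, q4⟩
            simp [e1, e2, e3, e4, hrev _ q4, List.lookup]
          · have e4 : PySem.Chars.endswith email.toList (['@', 'c', 's', 'u', 'f', '.', 'e', 'd', 'u'] : List Char) = false := by
              rw [Bool.eq_false_iff]; exact fun h => q4 (h4.mp h).2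
            have k4 := hrev' _ q4
            by_cases q5 : t = (['u', 'c', 's', 'd', '.', 'e', 'd', 'u'] : List Char).reverse
            · have e5 := h5.mpr ⟨hdw, q5⟩
              simp [e1, e2, e3, e4, e5, hrev _ q5, List.lookup]
            · have e5 : PySem.Chars.endswith email.toList (['@', 'u', 'c', 's', 'd', '.', 'e', 'd', 'u'] : List Char) = false := by
                rw [Bool.eq_false_iff]; exact fun h => q5 (h5.mp h).2
              have k5 := hrev' _ q5
              by_cases q6 : t = (['u', 's', 'c', '.', 'e', 'd', 'u'] : List Char).reverse
              · have e6 := h6.mpr ⟨hdw, q6⟩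
                simp [e1, e2, e3, e4, e5, e6, hrev _ q6, List.lookup]
              · have e6 : PySem.Chars.endswith email.toList (['@', 'u', 's', 'c', '.', 'e', 'd', 'u'] : List Char) = false := by
                  rw [Bool.eq_false_iff]; exact fun h => q6 (h6.mp h).2
                have k6 := hrev' _ q6
                simp [e1, e2, e3, e4, e5, e6, List.lookup, k1, k2, k3, k4, k5, k6]
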